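-- pv_equiv track=rewrite | github.com/DS-codi/Project-Memory-MCP | python-core/memory_cartographer/engines/code_cartography.py | _normalize_language_filters
-- ===== SOURCE A (Python) =====
-- from typing import Optional
--
-- def _normalize_language_filters(languages: Optional[list[str]]) -> list[str]:
--     if not languages:
--         return []
--
--     deduped: set[str] = set()
--     normalized: list[str] = []
--     for language in languages:
--         if not isinstance(language, str):
--             continue
--         candidate = language.strip().lower()
--         if not candidate or candidate in deduped:
--             continue
--         deduped.add(candidate)
--         normalized.append(candidate)
--     normalized.sort()
--     return normalized
-- ===== SOURCE B (Python) =====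
-- def _normalize_language_filters(languages):
--     if not languages:
--         return []
--
--     candidates = sorted(
--         language.strip().lower()
--         for language in languages
--         if isinstance(language, str)
--     )
--     result = []
--     prev = None
--     for candidate in candidates:
--         if candidate and candidate != prev:
--             result.append(candidate)
--         prev = candidate
--     return result
-- ===== Notes on version B (the rewrite author's own statement) =====
-- stated objective: alternative
-- what changed: Sort the normalized candidates first, then remove empties and duplicates in one adjacent-dedup pass with a single prev sentinel, instead of hash-set dedup into an ordered list followed by a sort.
import Mathlib
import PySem

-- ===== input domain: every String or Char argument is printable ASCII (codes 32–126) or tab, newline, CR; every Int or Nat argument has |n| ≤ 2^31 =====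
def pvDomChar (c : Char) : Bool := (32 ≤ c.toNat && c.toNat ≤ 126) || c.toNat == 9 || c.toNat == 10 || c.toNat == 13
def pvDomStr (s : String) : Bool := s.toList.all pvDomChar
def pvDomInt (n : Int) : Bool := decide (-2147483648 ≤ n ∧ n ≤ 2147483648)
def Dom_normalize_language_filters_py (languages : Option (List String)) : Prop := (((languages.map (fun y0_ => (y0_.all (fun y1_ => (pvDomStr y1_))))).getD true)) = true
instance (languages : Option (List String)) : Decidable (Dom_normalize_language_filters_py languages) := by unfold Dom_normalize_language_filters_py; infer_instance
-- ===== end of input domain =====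

-- B replaces A's hash-set dedup + final sort by sort-first then a single adjacent-dedup pass (alternative decomposition, same cost).

-- ===== PORT A =====
def normalize_language_filters_py (languages : Option (List String)) : List String :=
  match languages with
  | none => []
  | some ls =>
    if ls = [] then []
    else
      let r := ls.foldl (fun (st : PySem.Set String × List String) language =>
        let candidate := PySem.Str.lower (PySem.Str.strip language)
        if candidate = "" ∨ PySem.Set.contains st.1 candidate = true then st
        else (PySem.Set.add st.1 candidate, st.2 ++ [candidate]))
        (PySem.Set.empty, [])
      PySem.List.sorted r.2 (fun x => x) false

-- ===== PORT B =====
def normalize_language_filters_py_alt (languages : Option (List String)) : List String :=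
  match languages with
  | none => []
  | some ls =>
    if ls = [] then []
    else
      let candidates := PySem.List.sorted
        (ls.map (fun language => PySem.Str.lower (PySem.Str.strip language))) (fun x => x) false
      (candidates.foldl (fun (st : List String × Option String) candidate =>
        ((if candidate ≠ "" ∧ some candidate ≠ st.2 then st.1 ++ [candidate] else st.1),
         some candidate))
        ([], none)).1

-- ===== PRECONDITION & SPEC =====
def Spec_normalize_language_filters_py (languages : Option (List String)) (out : List String) : Prop := out = normalize_language_filters_py_alt languages
instance (languages : Option (List String)) (out : List String) : Decidable (Spec_normalize_language_filters_py languages out) := by unfold Spec_normalize_language_filters_py; infer_instance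

-- ===== CLAIM (what is proved, stated in full; the proofs are below) =====
def Claim_equal_normalize_language_filters_py : Prop := ∀ (languages : Option (List String)), Dom_normalize_language_filters_py languages → Spec_normalize_language_filters_py languages (normalize_language_filters_py languages)

-- ===== LEMMAS AND PROOFS =====

-- A's loop body / B's loop body, named for the proofs (let-free but defeq to the ports' lambdas)
def pvAStep : PySem.Set String × List String → String → PySem.Set String × List String :=
  fun st language =>
    if PySem.Str.lower (PySem.Str.strip language) = "" ∨
        PySem.Set.contains st.1 (PySem.Str.lower (PySem.Str.strip language)) = true then st
    else (PySem.Set.add st.1 (PySem.Str.lower (PySem.Str.strip language)),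
          st.2 ++ [PySem.Str.lower (PySem.Str.strip language)])

def pvBStep : List String × Option String → String → List String × Option String :=
  fun st candidate =>
    ((if candidate ≠ "" ∧ some candidate ≠ st.2 then st.1 ++ [candidate] else st.1),
     some candidate)

lemma pvAStep_skip (st : PySem.Set String × List String) (l : String)
    (h : PySem.Str.lower (PySem.Str.strip l) = "" ∨
         PySem.Set.contains st.1 (PySem.Str.lower (PySem.Str.strip l)) = true) :
    pvAStep st l = st := by
  unfold pvAStep; rw [if_pos h]

lemma pvAStep_take (st : PySem.Set String × List String) (l : String)
    (h : ¬(PySem.Str.lower (PySem.Str.strip l) = "" ∨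
         PySem.Set.contains st.1 (PySem.Str.lower (PySem.Str.strip l)) = true)) :
    pvAStep st l = (PySem.Set.add st.1 (PySem.Str.lower (PySem.Str.strip l)),
                    st.2 ++ [PySem.Str.lower (PySem.Str.strip l)]) := by
  unfold pvAStep; rw [if_neg h]

-- recursive form of B's fold
def pvAdlist : Option String → List String → List String
  | _, [] => []
  | prev, c :: rest =>
      (if c ≠ "" ∧ some c ≠ prev then [c] else []) ++ pvAdlist (some c) rest

lemma pvBfold_eq (s : List String) : ∀ (acc : List String) (prev : Option String),
    (s.foldl pvBStep (acc, prev)).1 = acc ++ pvAdlist prev s := by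
  induction s with
  | nil => intro acc prev; simp [pvAdlist]
  | cons c rest ih =>
      intro acc prev
      simp only [List.foldl_cons, pvAdlist]
      by_cases h : c ≠ "" ∧ some c ≠ prev
      · simp [pvBStep, h, ih]
      · simp [pvBStep, h, ih]

lemma pvAdlist_mem (s : List String) : ∀ (prev : Option String),
    s.Pairwise (· ≤ ·) → (∀ p, prev = some p → ∀ y ∈ s, p ≤ y) →
    ∀ x, x ∈ pvAdlist prev s ↔ x ∈ s ∧ x ≠ "" ∧ some x ≠ prev := by
  induction s with
  | nil => intro prev _ _ x; simp [pvAdlist]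
  | cons c rest ih =>
      intro prev hpw hp x
      have hcr : ∀ y ∈ rest, c ≤ y := (List.pairwise_cons.mp hpw).1
      have ihm := ih (some c) (List.pairwise_cons.mp hpw).2
        (by intro p hp' y hy; cases hp'; exact hcr y hy) x
      simp only [pvAdlist, List.mem_append, ihm, List.mem_cons]
      constructor
      · rintro (h | ⟨hxr, hxe, hxc⟩)
        · by_cases hc : c ≠ "" ∧ some c ≠ prev
          · rw [if_pos hc] at h
            simp at h; subst h; exact ⟨Or.inl rfl, hc.1, hc.2⟩
          · rw [if_neg hc] at h; simp at h
        · refine ⟨Or.inr hxr, hxe, ?_⟩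
          intro hxp
          have hpx : ∀ y ∈ (c :: rest), x ≤ y := hp x hxp.symm
          have h1 : x ≤ c := hpx c (List.mem_cons_self)
          have h2 : c ≤ x := hcr x hxr
          exact hxc (by simp [le_antisymm h2 h1])
      · rintro ⟨hx, hxe, hxp⟩
        cases hx with
        | inl h => subst h; left; rw [if_pos ⟨hxe, hxp⟩]; simp
        | inr hxr =>
            by_cases hxc : x = c
            · subst hxc; left; rw [if_pos ⟨hxe, hxp⟩]; simp
            · right; exact ⟨hxr, hxe, by simpa using hxc⟩

lemma pvAdlist_pairwise (s : List String) : ∀ (prev : Option String),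
    s.Pairwise (· ≤ ·) → (∀ p, prev = some p → ∀ y ∈ s, p ≤ y) →
    (pvAdlist prev s).Pairwise (· < ·) := by
  induction s with
  | nil => intro prev _ _; simp [pvAdlist]
  | cons c rest ih =>
      intro prev hpw hp
      have hcr : ∀ y ∈ rest, c ≤ y := (List.pairwise_cons.mp hpw).1
      have hprest : ∀ p, some (c : String) = some p → ∀ y ∈ rest, p ≤ y := by
        intro p hp' y hy; cases hp'; exact hcr y hy
      have htail := ih (some c) (List.pairwise_cons.mp hpw).2 hprest
      simp only [pvAdlist]
      by_cases hc : c ≠ "" ∧ some c ≠ prev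
      · rw [if_pos hc, List.singleton_append]
        refine List.pairwise_cons.mpr ⟨?_, htail⟩
        intro y hy
        have := (pvAdlist_mem rest (some c) (List.pairwise_cons.mp hpw).2 hprest y).mp hy
        exact lt_of_le_of_ne (hcr y this.1) (by intro h; exact this.2.2 (by simp [h]))
      · rw [if_neg hc, List.nil_append]; exact htail

-- A's loop: membership and nodup of the accumulated list
lemma pvAfold_mem (ls : List String) : ∀ (st : PySem.Set String) (acc : List String),
    (∀ x, PySem.Set.contains st x = true ↔ x ∈ acc) →
    ∀ x, x ∈ (ls.foldl pvAStep (st, acc)).2 ↔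
      x ∈ acc ∨ (x ∈ ls.map (fun l => PySem.Str.lower (PySem.Str.strip l)) ∧ x ≠ "") := by
  induction ls with
  | nil => intro st acc _ x; simp
  | cons l rest ih =>
      intro st acc hst x
      simp only [List.foldl_cons, List.map_cons, List.mem_cons]
      by_cases h : PySem.Str.lower (PySem.Str.strip l) = "" ∨
          PySem.Set.contains st (PySem.Str.lower (PySem.Str.strip l)) = true
      · rw [pvAStep_skip (st, acc) l h, ih st acc hst x]
        constructor
        · rintro (ha | hb)
          · exact Or.inl ha
          · exact Or.inr ⟨Or.inr hb.1, hb.2⟩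
        · rintro (ha | ⟨hxc | hxr, hxe⟩)
          · exact Or.inl ha
          · subst hxc
            cases h with
            | inl he => exact absurd he hxe
            | inr hm => exact Or.inl ((hst _).mp hm)
          · exact Or.inr ⟨hxr, hxe⟩
      · rw [pvAStep_take (st, acc) l h]
        push_neg at h
        have hst' : ∀ y, PySem.Set.contains
            (PySem.Set.add st (PySem.Str.lower (PySem.Str.strip l))) y = true ↔
            y ∈ acc ++ [PySem.Str.lower (PySem.Str.strip l)] := by
          intro y
          rw [PySem.Set.contains_iff, PySem.Set.mem_add]
          simp [← hst y, PySem.Set.contains_iff]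
        rw [ih _ _ hst' x]
        simp only [List.mem_append, List.mem_singleton]
        constructor
        · rintro (⟨ha | hxc⟩ | hb)
          · exact Or.inl ha
          · exact Or.inr ⟨Or.inl hxc, by rw [hxc]; exact h.1⟩
          · exact Or.inr ⟨Or.inr hb.1, hb.2⟩
        · rintro (ha | ⟨hxc | hxr, hxe⟩)
          · exact Or.inl (Or.inl ha)
          · exact Or.inl (Or.inr hxc)
          · exact Or.inr ⟨hxr, hxe⟩

lemma pvAfold_nodup (ls : List String) : ∀ (st : PySem.Set String) (acc : List String),
    (∀ x, PySem.Set.contains st x = true ↔ x ∈ acc) → acc.Nodup →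
    (ls.foldl pvAStep (st, acc)).2.Nodup := by
  induction ls with
  | nil => intro st acc _ h; simpa using h
  | cons l rest ih =>
      intro st acc hst hnd
      simp only [List.foldl_cons]
      by_cases h : PySem.Str.lower (PySem.Str.strip l) = "" ∨
          PySem.Set.contains st (PySem.Str.lower (PySem.Str.strip l)) = true
      · rw [pvAStep_skip (st, acc) l h]; exact ih st acc hst hnd
      · rw [pvAStep_take (st, acc) l h]
        push_neg at h
        have hst' : ∀ y, PySem.Set.contains
            (PySem.Set.add st (PySem.Str.lower (PySem.Str.strip l))) y = true ↔
            y ∈ acc ++ [PySem.Str.lower (PySem.Str.strip l)] := by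
          intro y
          rw [PySem.Set.contains_iff, PySem.Set.mem_add]
          simp [← hst y, PySem.Set.contains_iff]
        have hc_notin : PySem.Str.lower (PySem.Str.strip l) ∉ acc := fun hm => by
          have := (hst _).mpr hm; exact absurd this (by simpa using h.2)
        refine ih _ _ hst' ?_
        refine List.Nodup.append hnd (List.nodup_singleton _) ?_
        intro a ha hb
        rw [List.mem_singleton] at hb
        subst hb
        exact hc_notin ha

-- ===== VERDICT (by name: the statement is the Claim_ definition above) =====
theorem normalize_language_filters_py_spec : Claim_equal_normalize_language_filters_py := by
  intro languages _
  unfold Spec_normalize_language_filters_py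
  cases languages with
  | none => rfl
  | some ls =>
    by_cases hnil : ls = []
    · subst hnil; rfl
    · show (if ls = [] then [] else
          PySem.List.sorted (ls.foldl pvAStep (PySem.Set.empty, [])).2 (fun x => x) false)
        = (if ls = [] then ([] : List String) else
          ((PySem.List.sorted (ls.map (fun language => PySem.Str.lower (PySem.Str.strip language)))
              (fun x => x) false).foldl pvBStep ([], none)).1)
      rw [if_neg hnil, if_neg hnil]
      set ms := ls.map (fun l => PySem.Str.lower (PySem.Str.strip l)) with hms
      set srt := PySem.List.sorted ms (fun x => x) false with hsrt
      have hsrt_pw : srt.Pairwise (· ≤ ·) := by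
        simpa using PySem.List.sorted_pairwise ms (fun x => x)
      have hprev : ∀ p, (none : Option String) = some p → ∀ y ∈ srt, p ≤ y := by
        intro p h; cases h
      have hB : (srt.foldl pvBStep ([], none)).1 = pvAdlist none srt := by
        simpa using pvBfold_eq srt [] none
      have hstemp : ∀ x, PySem.Set.contains (PySem.Set.empty : PySem.Set String) x = true ↔ x ∈ ([] : List String) := by
        intro x; simp [PySem.Set.contains_iff, PySem.Set.empty]
      have hAmem := pvAfold_mem ls PySem.Set.empty [] hstemp
      have hAnd := pvAfold_nodup ls PySem.Set.empty [] hstemp (by simp)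
      set normAcc := (ls.foldl pvAStep (PySem.Set.empty, [])).2 with hna
      have hBpw := pvAdlist_pairwise srt none hsrt_pw hprev
      have hBnd : (pvAdlist none srt).Nodup := hBpw.imp (fun h => ne_of_lt h)
      have hmemiff : ∀ x, x ∈ pvAdlist none srt ↔ x ∈ normAcc := by
        intro x
        rw [pvAdlist_mem srt none hsrt_pw hprev x, hAmem x, hsrt,
          PySem.List.mem_sorted, hms]
        constructor
        · rintro ⟨hm, he, _⟩; exact Or.inr ⟨hm, he⟩
        · rintro (hf | ⟨hm, he⟩)
          · exact absurd hf (List.not_mem_nil)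
          · exact ⟨hm, he, by simp⟩
      have hperm : (pvAdlist none srt).Perm normAcc :=
        (List.perm_ext_iff_of_nodup hBnd hAnd).mpr hmemiff
      have hfinal : PySem.List.sorted normAcc (fun x => x) false = pvAdlist none srt :=
        PySem.List.sorted_eq_of_perm_of_pairwise_lt normAcc (pvAdlist none srt) (fun x => x) hperm hBpw
      rw [hfinal, hB]
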